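-- pv_equiv track=rewrite | github.com/sz17320828912-tech/AgentBench_Memory | initialization.py | _calculate_last_completed_context_id
-- ===== SOURCE A (Python) =====
-- def _calculate_last_completed_context_id(all_query_answer_pairs, total_queries_processed):
--     """
--     Calculate how many complete contexts have been processed based on total queries.
--
--     Args:
--         all_query_answer_pairs: List of query-answer pairs for all contexts
--         total_queries_processed: Total number of queries that have been processed
--
--     Returns:
--         int: Number of completely processed contexts
--     """
--     queries_counted = 0
--
--     for context_id, query_answer_pairs in enumerate(all_query_answer_pairs):
--         if queries_counted + len(query_answer_pairs) <= total_queries_processed: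
--             queries_counted += len(query_answer_pairs)
--         else:
--             return context_id
--
--     return len(all_query_answer_pairs)
-- ===== SOURCE B (Python) =====
-- def _calculate_last_completed_context_id(all_query_answer_pairs, total_queries_processed):
--     # Build the cumulative prefix-sum table of context sizes, then binary-search
--     # for the count of complete contexts (bisect_right, hand-rolled).
--     prefix = []
--     running = 0
--     for query_answer_pairs in all_query_answer_pairs:
--         running += len(query_answer_pairs)
--         prefix.append(running)
--     lo, hi = 0, len(prefix)
--     while lo < hi:
--         mid = (lo + hi) // 2
--         if prefix[mid] <= total_queries_processed:
--             lo = mid + 1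
--         else:
--             hi = mid
--     return lo
-- ===== Notes on version B (the rewrite author's own statement) =====
-- stated objective: alternative
-- what changed: Replaces the greedy early-exit scan with a prefix-sum table plus a hand-rolled bisect_right binary search over it; correctness rests on the table being nondecreasing.
import Mathlib
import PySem

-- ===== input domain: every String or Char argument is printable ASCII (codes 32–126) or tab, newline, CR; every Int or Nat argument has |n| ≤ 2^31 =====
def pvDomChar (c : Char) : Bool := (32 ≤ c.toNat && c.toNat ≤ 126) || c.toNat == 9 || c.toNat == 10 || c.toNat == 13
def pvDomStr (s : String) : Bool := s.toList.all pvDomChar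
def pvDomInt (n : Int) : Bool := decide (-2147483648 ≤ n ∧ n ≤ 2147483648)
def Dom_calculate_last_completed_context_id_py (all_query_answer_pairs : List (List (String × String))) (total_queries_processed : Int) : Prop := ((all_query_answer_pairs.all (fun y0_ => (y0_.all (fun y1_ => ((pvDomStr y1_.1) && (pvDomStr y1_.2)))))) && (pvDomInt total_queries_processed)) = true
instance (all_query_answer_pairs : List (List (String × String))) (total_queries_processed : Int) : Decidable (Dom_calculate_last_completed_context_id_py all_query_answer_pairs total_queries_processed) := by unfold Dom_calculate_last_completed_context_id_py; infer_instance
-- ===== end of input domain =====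

-- B replaces A's greedy early-exit scan with a prefix-sum table plus a bisect_right binary search (alternative decomposition; same asymptotic cost).

-- ===== PORT A =====
-- the enumerate-loop of A: cid = context_id, counted = queries_counted, total = len(all_query_answer_pairs)
def pvALoop (t : Int) : List (List (String × String)) → Int → Int → Int → Int
  | [], _, _, total => total
  | qas :: rest, cid, counted, total =>
      if counted + (qas.length : Int) ≤ t then
        pvALoop t rest (cid + 1) (counted + (qas.length : Int)) total
      else cid

def calculate_last_completed_context_id_py (all_query_answer_pairs : List (List (String × String))) (total_queries_processed : Int) : Int :=
  pvALoop total_queries_processed all_query_answer_pairs 0 0 (all_query_answer_pairs.length : Int)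

-- ===== PORT B =====
-- build the prefix list: running sums appended one by one, no leading 0
def pvBuildPrefix : List (List (String × String)) → Int → List Int → List Int
  | [], _, acc => acc
  | qas :: rest, running, acc =>
      pvBuildPrefix rest (running + (qas.length : Int)) (acc ++ [running + (qas.length : Int)])

-- hand-rolled bisect_right loop of Source B; the `none` branch is unreachable for
-- 0 ≤ lo < hi ≤ len (there Python's prefix[mid] would raise IndexError)
def pvBisect (pfx : List Int) (t : Int) (lo hi : Int) : Int :=
  if _h : lo < hi then
    let mid := PySem.Int.floordiv (lo + hi) 2
    match PySem.List.pyGet? pfx mid with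
    | some v => if v ≤ t then pvBisect pfx t (mid + 1) hi else pvBisect pfx t lo mid
    | none => lo
  else lo
termination_by (hi - lo).toNat
decreasing_by
  · have h1 := (PySem.Int.le_floordiv_iff_mul_le (a := lo + hi) (b := 2) (q := lo) (by omega)).mpr (by omega)
    have h2 := (PySem.Int.floordiv_lt_iff_lt_mul (a := lo + hi) (b := 2) (q := hi) (by omega)).mpr (by omega)
    omega
  · have h1 := (PySem.Int.le_floordiv_iff_mul_le (a := lo + hi) (b := 2) (q := lo) (by omega)).mpr (by omega)
    have h2 := (PySem.Int.floordiv_lt_iff_lt_mul (a := lo + hi) (b := 2) (q := hi) (by omega)).mpr (by omega)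
    omega

def calculate_last_completed_context_id_py_alt (all_query_answer_pairs : List (List (String × String))) (total_queries_processed : Int) : Int :=
  let pfx := pvBuildPrefix all_query_answer_pairs 0 []
  pvBisect pfx total_queries_processed 0 (pfx.length : Int)

-- ===== PRECONDITION & SPEC =====
def Spec_calculate_last_completed_context_id_py (all_query_answer_pairs : List (List (String × String))) (total_queries_processed : Int) (out : Int) : Prop := out = calculate_last_completed_context_id_py_alt all_query_answer_pairs total_queries_processed
instance (all_query_answer_pairs : List (List (String × String))) (total_queries_processed : Int) (out : Int) : Decidable (Spec_calculate_last_completed_context_id_py all_query_answer_pairs total_queries_processed out) := by unfold Spec_calculate_last_completed_context_id_py; infer_instance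

-- ===== CLAIM (what is proved, stated in full; the proofs are below) =====
def Claim_equal_calculate_last_completed_context_id_py : Prop := ∀ (all_query_answer_pairs : List (List (String × String))) (total_queries_processed : Int), Dom_calculate_last_completed_context_id_py all_query_answer_pairs total_queries_processed → Spec_calculate_last_completed_context_id_py all_query_answer_pairs total_queries_processed (calculate_last_completed_context_id_py all_query_answer_pairs total_queries_processed)

-- ===== LEMMAS AND PROOFS =====

-- the list of running prefix sums, as a plain recursive definition
def pvPsums : List (List (String × String)) → Int → List Int
  | [], _ => []
  | qas :: rest, c => (c + (qas.length : Int)) :: pvPsums rest (c + (qas.length : Int))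

lemma pvBuildPrefix_eq : ∀ (l : List (List (String × String))) (c : Int) (acc : List Int),
    pvBuildPrefix l c acc = acc ++ pvPsums l c := by
  intro l
  induction l with
  | nil => intro c acc; simp [pvBuildPrefix, pvPsums]
  | cons x r ih => intro c acc; simp [pvBuildPrefix, pvPsums, ih]

lemma pvPsums_lb : ∀ (l : List (List (String × String))) (c x : Int), x ∈ pvPsums l c → c ≤ x := by
  intro l
  induction l with
  | nil => intro c x hx; simp [pvPsums] at hx
  | cons y r ih =>
    intro c x hx
    simp only [pvPsums, List.mem_cons] at hx
    rcases hx with h | h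
    · omega
    · have := ih _ _ h; omega

lemma pvPsums_sorted : ∀ (l : List (List (String × String))) (c : Int),
    List.Pairwise (· ≤ ·) (pvPsums l c) := by
  intro l
  induction l with
  | nil => intro c; simp [pvPsums]
  | cons y r ih =>
    intro c
    simp only [pvPsums]
    exact List.Pairwise.cons (fun x hx => le_trans (by omega) (pvPsums_lb r _ x hx)) (ih _)

lemma pvMono {P : List Int} (hp : List.Pairwise (· ≤ ·) P) :
    ∀ (i j : Nat) (hi : i < P.length) (hj : j < P.length), i ≤ j → P[i] ≤ P[j] := by
  intro i j hi hj hij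
  rcases Nat.lt_or_ge i j with h | h
  · exact (List.pairwise_iff_getElem.mp hp) i j hi hj h
  · have : i = j := by omega
    subst this; exact le_rfl

lemma pvTakeWhile_len (p : Int → Bool) : ∀ (P : List Int) (n : Nat), n ≤ P.length →
    (∀ (i : Nat) (h : i < P.length), i < n → p P[i] = true) →
    (∀ (i : Nat) (h : i < P.length), n ≤ i → p P[i] = false) →
    (P.takeWhile p).length = n := by
  intro P
  induction P with
  | nil => intro n hn _ _; simp only [List.length_nil, Nat.le_zero] at hn; simp [hn]
  | cons x r ih =>
    intro n hn htt hff
    cases n with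
    | zero =>
      have hx : p x = false := hff 0 (by simp) (by omega)
      simp [List.takeWhile, hx]
    | succ m =>
      have hx : p x = true := htt 0 (by simp) (by omega)
      have : (r.takeWhile p).length = m := by
        apply ih m (by simpa using hn)
        · intro i h hi; exact htt (i + 1) (by simpa using h) (by omega)
        · intro i h hi; exact hff (i + 1) (by simpa using h) (by omega)
      simp [List.takeWhile, hx, this]

lemma pvBisect_correct (P : List Int) (t : Int) (hp : List.Pairwise (· ≤ ·) P) :
    ∀ (lo hi : Int), 0 ≤ lo → lo ≤ hi → hi ≤ (P.length : Int) →
    (∀ (i : Nat) (h : i < P.length), (i : Int) < lo → P[i] ≤ t) →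
    (∀ (i : Nat) (h : i < P.length), hi ≤ (i : Int) → t < P[i]) →
    pvBisect P t lo hi = ((P.takeWhile (fun x => decide (x ≤ t))).length : Int) := by
  intro lo hi
  generalize hk : (hi - lo).toNat = k
  induction k using Nat.strong_induction_on generalizing lo hi with
  | _ k ihk =>
    intro hlo hlh hhl hlow hhigh
    rw [pvBisect]
    by_cases h : lo < hi
    · simp only [h, dif_pos]
      have h1 := (PySem.Int.le_floordiv_iff_mul_le (a := lo + hi) (b := 2) (q := lo) (by omega)).mpr (by omega)
      have h2 := (PySem.Int.floordiv_lt_iff_lt_mul (a := lo + hi) (b := 2) (q := hi) (by omega)).mpr (by omega)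
      set mid := PySem.Int.floordiv (lo + hi) 2 with hmid
      have hmidnn : 0 ≤ mid := by omega
      have hmlen : mid.toNat < P.length := by omega
      have hget : PySem.List.pyGet? P mid = some P[mid.toNat] := by
        conv_lhs => rw [show mid = ((mid.toNat : Nat) : Int) from by omega]
        rw [PySem.List.pyGet?_natCast, List.getElem?_eq_getElem hmlen]
      simp only [hget]
      by_cases hv : P[mid.toNat] ≤ t
      · rw [if_pos hv]
        apply ihk (hi - (mid + 1)).toNat (by omega) (mid + 1) hi rfl (by omega) (by omega) hhl _ hhigh
        intro i hiP hilt
        exact le_trans (pvMono hp i mid.toNat hiP hmlen (by omega)) hv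
      · rw [if_neg hv]
        apply ihk (mid - lo).toNat (by omega) lo mid rfl hlo (by omega) (by omega) hlow
        intro i hiP hige
        exact lt_of_lt_of_le (not_le.mp hv) (pvMono hp mid.toNat i hmlen hiP (by omega))
    · rw [dif_neg h]
      have hle : lo = hi := by omega
      have : (P.takeWhile (fun x => decide (x ≤ t))).length = lo.toNat := by
        apply pvTakeWhile_len _ P lo.toNat (by omega)
        · intro i hiP hilt
          simpa using hlow i hiP (by omega)
        · intro i hiP hige
          simpa using hhigh i hiP (by omega)
      omega

lemma pvALoop_eq : ∀ (l : List (List (String × String))) (t cid counted : Int),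
    pvALoop t l cid counted (cid + (l.length : Int)) =
      cid + (((pvPsums l counted).takeWhile (fun x => decide (x ≤ t))).length : Int) := by
  intro l
  induction l with
  | nil => intro t cid counted; simp [pvALoop, pvPsums]
  | cons x r ih =>
    intro t cid counted
    simp only [pvALoop, pvPsums, List.length_cons]
    by_cases hc : counted + (x.length : Int) ≤ t
    · have hrec := ih t (cid + 1) (counted + (x.length : Int))
      have htot : cid + ((r.length + 1 : Nat) : Int) = (cid + 1) + (r.length : Int) := by
        push_cast; ring
      rw [if_pos hc, htot, hrec]
      simp [hc]
      ring
    · rw [if_neg hc]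
      simp [hc]

-- ===== VERDICT (by name: the statement is the Claim_ definition above) =====
theorem calculate_last_completed_context_id_py_spec : Claim_equal_calculate_last_completed_context_id_py := by
  intro l t _
  show calculate_last_completed_context_id_py l t = calculate_last_completed_context_id_py_alt l t
  unfold calculate_last_completed_context_id_py calculate_last_completed_context_id_py_alt
  rw [pvBuildPrefix_eq]
  simp only [List.nil_append]
  rw [pvBisect_correct (pvPsums l 0) t (pvPsums_sorted l 0) 0 ((pvPsums l 0).length : Int)
        le_rfl (by exact_mod_cast Nat.zero_le _) le_rfl
        (by intro i _ hi; omega)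
        (by intro i h hi; exfalso; omega)]
  have := pvALoop_eq l t 0 0
  simpa using this
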